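-- pv_equiv track=rewrite | github.com/SalarSamani/des_sideChannel | week1/task5/find_full_key.py | generate_k1_ints
-- ===== SOURCE A (Python) =====
-- import itertools
--
-- def generate_k1_ints(candidates, top_n):
--     """
--     candidates: 2D list of ints [8 x 5] from sbox_out.txt
--     top_n: number of candidates per S-box row to use (1..5)
--
--     Yields 48-bit K1 integers.
--     K1 layout: [S1 (MSB 6 bits)] ... [S8 (LSB 6 bits)]
--     """
--     if not (1 <= top_n <= 5):
--         raise ValueError("top_n must be between 1 and 5")
--
--     per_sbox_lists = [row[:top_n] for row in candidates]  # 8 rows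
--
--     for combo in itertools.product(*per_sbox_lists):
--         k1 = 0
--         for sbox_index, subkey_6bit in enumerate(combo):
--             shift = (7 - sbox_index) * 6
--             k1 |= (subkey_6bit & 0x3F) << shift
--         yield k1
-- ===== SOURCE B (Python) =====
-- def generate_k1_ints(candidates, top_n):
--     """Same keys as A, but built by a recursive generator that threads the
--     partial key as an accumulator instead of itertools.product + re-encoding."""
--     if not (1 <= top_n <= 5):
--         raise ValueError("top_n must be between 1 and 5")
--
--     def rec(rows, index, acc):
--         if not rows:
--             yield acc
--             return
--         for c in rows[0]:
--             yield from rec(rows[1:], index + 1, acc | ((c & 0x3F) << ((7 - index) * 6)))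
--
--     yield from rec([row[:top_n] for row in candidates], 0, 0)
-- ===== Notes on version B (the rewrite author's own statement) =====
-- stated objective: alternative
-- what changed: Replaces itertools.product plus a per-combination enumerate/re-encode loop by a single recursive generator that threads the partially built 48-bit key as an accumulator, OR-ing each S-box's 6-bit contribution in as it descends.
-- outside the precondition, e.g. on generate_k1_ints([[1], [1], [1], [1], [1], [1], [1], [1], [1], []], 1): A returns [], B raises ValueError
import Mathlib
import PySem

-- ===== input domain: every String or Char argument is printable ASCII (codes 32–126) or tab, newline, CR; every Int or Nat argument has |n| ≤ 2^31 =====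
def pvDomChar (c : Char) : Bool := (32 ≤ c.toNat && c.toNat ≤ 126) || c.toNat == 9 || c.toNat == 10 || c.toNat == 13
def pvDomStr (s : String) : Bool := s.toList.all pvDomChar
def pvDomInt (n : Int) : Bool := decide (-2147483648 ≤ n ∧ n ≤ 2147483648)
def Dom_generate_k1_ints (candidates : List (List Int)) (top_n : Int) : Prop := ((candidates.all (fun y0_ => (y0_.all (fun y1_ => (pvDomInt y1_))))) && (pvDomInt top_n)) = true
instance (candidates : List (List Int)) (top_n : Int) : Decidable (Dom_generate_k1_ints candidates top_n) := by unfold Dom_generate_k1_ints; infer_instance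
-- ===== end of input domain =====

-- B replaces itertools.product plus per-combo re-encoding by one recursive pass that
-- threads the partial key as an accumulator (objective: alternative decomposition).
-- A and B are Python generators; equivalence is about the list of yielded values.


-- ===== PORT A =====
-- Literal port of A: slice each row, build itertools.product left-to-right (last list
-- varies fastest), then encode each combo with the enumerate loop.  Python raises
-- ValueError when top_n is outside 1..5 (excluded by Pre_); the '.toNat' on the shift
-- clamps only where Python would raise on a negative shift (inputs excluded by Pre_).
def generate_k1_ints (candidates : List (List Int)) (top_n : Int) : List Int :=
  if 1 ≤ top_n ∧ top_n ≤ 5 then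
    let per_sbox_lists := candidates.map (fun row => PySem.List.slice row none (some top_n))
    let combos := per_sbox_lists.foldl
      (fun acc row => acc.flatMap (fun c => row.map (fun x => c ++ [x]))) [[]]
    combos.map (fun combo =>
      (PySem.List.enumerate combo 0).foldl
        (fun k1 p => PySem.Int.bor k1 (PySem.Int.band p.2 63 <<< ((7 - p.1) * 6).toNat)) 0)
  else []  -- Python: raise ValueError (outside Pre_)

-- ===== PORT B =====
-- Literal port of Source B's rec(rows, index, acc); same remarks on ValueError / negative shift.
def recGenK1 (rows : List (List Int)) (index : Int) (acc : Int) : List Int :=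
  match rows with
  | [] => [acc]
  | row :: rest =>
      row.flatMap (fun c =>
        recGenK1 rest (index + 1) (PySem.Int.bor acc (PySem.Int.band c 63 <<< ((7 - index) * 6).toNat)))

def generate_k1_ints_alt (candidates : List (List Int)) (top_n : Int) : List Int :=
  if 1 ≤ top_n ∧ top_n ≤ 5 then
    recGenK1 (candidates.map (fun row => PySem.List.slice row none (some top_n))) 0 0
  else []  -- Python: raise ValueError (outside Pre_)

-- ===== PRECONDITION & SPEC =====
-- Pre_ excludes top_n outside 1..5 (A raises ValueError) and inputs with more than 8 rows
-- whose first 8 rows are all nonempty — outside the documented 8x5 shape: there A raises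
-- ValueError on a negative shift count, except that when only a row past the eighth is
-- empty A's product is empty and yields nothing while B's recursion, which reaches the
-- ninth row before consulting it, raises that same ValueError first.
def Pre_generate_k1_ints (candidates : List (List Int)) (top_n : Int) : Prop :=
  1 ≤ top_n ∧ top_n ≤ 5 ∧ (candidates.length ≤ 8 ∨ [] ∈ candidates.take 8)
instance (candidates : List (List Int)) (top_n : Int) : Decidable (Pre_generate_k1_ints candidates top_n) := by unfold Pre_generate_k1_ints; infer_instance

def pvWitness_generate_k1_ints : List (List Int) × Int :=
  ([[1, 2, 3], [4], [5, 63], [7], [9], [11], [13], [0]], 2)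

def Spec_generate_k1_ints (candidates : List (List Int)) (top_n : Int) (out : List Int) : Prop := out = generate_k1_ints_alt candidates top_n
instance (candidates : List (List Int)) (top_n : Int) (out : List Int) : Decidable (Spec_generate_k1_ints candidates top_n out) := by unfold Spec_generate_k1_ints; infer_instance

-- ===== CLAIM (what is proved, stated in full; the proofs are below) =====
def Claim_equal_generate_k1_ints : Prop := ∀ (candidates : List (List Int)) (top_n : Int), Dom_generate_k1_ints candidates top_n → Pre_generate_k1_ints candidates top_n → Spec_generate_k1_ints candidates top_n (generate_k1_ints candidates top_n)

-- ===== LEMMAS AND PROOFS =====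

-- one 6-bit contribution
def k1Term (i : Int) (c : Int) : Int := PySem.Int.band c 63 <<< ((7 - i) * 6).toNat

-- the key encoded from a combo, indices starting at i (right-associated ors)
def k1Encode (i : Int) : List Int → Int
  | [] => 0
  | c :: rest => PySem.Int.bor (k1Term i c) (k1Encode (i + 1) rest)

-- cartesian product, head varying slowest (last list fastest)
def prodR : List (List Int) → List (List Int)
  | [] => [[]]
  | row :: rest => row.flatMap (fun x => (prodR rest).map (x :: ·))

theorem k1Term_eq (i c : Int) :
    PySem.Int.band c 63 <<< ((7 - i) * 6).toNat = k1Term i c := rfl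

theorem bor_nonneg {a b : Int} (ha : 0 ≤ a) (hb : 0 ≤ b) : 0 ≤ PySem.Int.bor a b := by
  rw [PySem.Int.bor_of_nonneg ha hb]; exact Int.natCast_nonneg _

theorem bor_assoc_nonneg {a b c : Int} (ha : 0 ≤ a) (hb : 0 ≤ b) (hc : 0 ≤ c) :
    PySem.Int.bor (PySem.Int.bor a b) c = PySem.Int.bor a (PySem.Int.bor b c) := by
  rw [PySem.Int.bor_of_nonneg ha hb, PySem.Int.bor_of_nonneg hb hc,
      PySem.Int.bor_of_nonneg (Int.natCast_nonneg _) hc,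
      PySem.Int.bor_of_nonneg ha (Int.natCast_nonneg _)]
  simp [Nat.or_assoc]

theorem k1Term_nonneg (i c : Int) : 0 ≤ k1Term i c := by
  unfold k1Term
  rw [Int.shiftLeft_eq]
  have hband : 0 ≤ PySem.Int.band c 63 := by
    rw [PySem.Int.band_comm]
    exact PySem.Int.band_nonneg_of_nonneg_left _ (by norm_num)
  positivity

theorem k1Encode_nonneg (i : Int) (l : List Int) : 0 ≤ k1Encode i l := by
  induction l generalizing i with
  | nil => simp [k1Encode]
  | cons c rest ih => exact bor_nonneg (k1Term_nonneg i c) (ih (i + 1))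

-- A's inner enumerate loop is k1Encode
theorem enumerate_foldl_encode (combo : List Int) : ∀ (i k0 : Int), 0 ≤ k0 →
    (PySem.List.enumerate combo i).foldl
      (fun k1 p => PySem.Int.bor k1 (k1Term p.1 p.2)) k0
    = PySem.Int.bor k0 (k1Encode i combo) := by
  induction combo with
  | nil => intro i k0 _; simp [PySem.List.enumerate_nil, k1Encode]
  | cons c rest ih =>
      intro i k0 hk0
      rw [PySem.List.enumerate_cons]
      simp only [List.foldl_cons]
      rw [ih (i + 1) _ (bor_nonneg hk0 (k1Term_nonneg i c)),
          bor_assoc_nonneg hk0 (k1Term_nonneg i c) (k1Encode_nonneg (i + 1) rest)]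
      rfl

-- the foldl that A builds from itertools.product, characterised by prodR
theorem foldl_product_eq (rows : List (List Int)) : ∀ (A : List (List Int)),
    rows.foldl (fun acc row => acc.flatMap (fun c => row.map (fun x => c ++ [x]))) A
    = A.flatMap (fun c => (prodR rows).map (fun t => c ++ t)) := by
  induction rows with
  | nil => intro A; simp [prodR]
  | cons row rest ih =>
      intro A
      simp only [List.foldl_cons]
      rw [ih]
      simp [prodR, List.flatMap_assoc, List.map_flatMap, List.flatMap_map, List.map_map,
            Function.comp_def, List.append_assoc]

-- B's recursion, characterised by prodR and k1Encode
theorem recGenK1_eq (rows : List (List Int)) : ∀ (i acc : Int), 0 ≤ acc →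
    recGenK1 rows i acc = (prodR rows).map (fun t => PySem.Int.bor acc (k1Encode i t)) := by
  induction rows with
  | nil => intro i acc _; simp [recGenK1, prodR, k1Encode, PySem.Int.bor_zero]
  | cons row rest ih =>
      intro i acc hacc
      simp only [recGenK1, prodR]
      rw [List.map_flatMap]
      congr 1
      funext c
      rw [k1Term_eq, ih (i + 1) _ (bor_nonneg hacc (k1Term_nonneg i c))]
      simp only [List.map_map, Function.comp_def, k1Encode]
      congr 1
      funext t
      exact bor_assoc_nonneg hacc (k1Term_nonneg i c) (k1Encode_nonneg (i + 1) t)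

theorem ports_agree (candidates : List (List Int)) (top_n : Int) :
    generate_k1_ints candidates top_n = generate_k1_ints_alt candidates top_n := by
  unfold generate_k1_ints generate_k1_ints_alt
  split
  · dsimp only
    rw [foldl_product_eq, recGenK1_eq _ 0 0 le_rfl]
    have hfun : (fun (k1 : Int) (p : Int × Int) =>
        PySem.Int.bor k1 (PySem.Int.band p.2 63 <<< ((((7 - p.1) * 6).toNat : Nat) : Int)))
        = fun (k1 : Int) (p : Int × Int) => PySem.Int.bor k1 (k1Term p.1 p.2) := by
      funext k1 p
      rw [Int.shiftLeft_natCast_right]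
      rfl
    rw [hfun]
    simp only [List.flatMap_cons, List.flatMap_nil, List.nil_append, List.append_nil,
               List.map_map, Function.comp_def]
    apply List.map_congr_left
    intro combo _
    exact enumerate_foldl_encode combo 0 0 le_rfl
  · rfl

-- ===== VERDICT (by name: the statement is the Claim_ definition above) =====
theorem generate_k1_ints_spec : Claim_equal_generate_k1_ints := by
  intro candidates top_n _ _
  exact ports_agree candidates top_n
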